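-- pv_equiv track=rewrite | github.com/n-getty/protein-pred | preprocess.py | gen_vocab
-- ===== SOURCE A (Python) =====
-- from itertools import islice, product
--
-- def reverse_complement(kmer, comp):
--     """
--     Generate a kmers complement
--     Params:
--         kmer....The kmer to generate the complement for
--     Returns:
--         A single kmer complement
--     """
--     rc = ()
--     for x in range(len(kmer)):
--         rc = rc + (comp[kmer[len(kmer)-x-1]],)
--     return rc
--
-- def gen_comp_dict(all_kmers):
--     """
--     Generates mapping of kmers to their complements
--     Params:
--         all_kmers...All possible kmers for a given k
--     Returns:
--         Dictionary mapping kmer to their complement and vice-versa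
--     """
--     comps = {}
--     comp = {'a': 't', 'c': 'g', 't': 'a', 'g': 'c'}
--     for kmer in all_kmers:
--         comps[kmer] = reverse_complement(kmer, comp)
--     return comps
--
-- def gen_vocab(k=3, mode='dna'):
--     """
--     Generate index kmer pairs for all possible kmers, binning complements together
--     Params:
--         k....length of kmer
--     Returns:
--         Dictionary mapping kmers and their complements to an index (column) in feature matrix
--     """
--     if mode == 'dna':
--         all_kmers = list(product('acgt', repeat=k))
--         comps = gen_comp_dict(all_kmers)
--     else:
--         all_kmers = list(product('FSYCLIMVPTAHQNKDEWRG'.lower(), repeat=k))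
--
--     vocab = {}
--     unique = 0
--
--     for mer in all_kmers:
--         if mode == 'dna':
--             rc = comps[mer]
--             if rc in vocab:
--                 vocab[mer] = vocab[rc]
--             else:
--                 vocab[mer] = unique
--                 unique += 1
--         else:
--             vocab[mer] = unique
--             unique += 1
--     return vocab
-- ===== SOURCE B (Python) =====
-- from itertools import product
-- from bisect import bisect_left
--
-- _COMP = {'a': 't', 'c': 'g', 't': 'a', 'g': 'c'}
--
--
-- def _rc(mer):
--     return tuple(_COMP[b] for b in reversed(mer))
--
--
-- def gen_vocab(k=3, mode='dna'):
--     if mode != 'dna':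
--         return {mer: i for i, mer in enumerate(product('FSYCLIMVPTAHQNKDEWRG'.lower(), repeat=k))}
--     kmers = list(product('acgt', repeat=k))
--     # canonical representatives (lexicographic min of each complement pair), already lex-sorted
--     canon = [mer for mer in kmers if not _rc(mer) < mer]
--     # a bin's index is the rank of its representative: binary search, no counter, no id dict
--     return {mer: bisect_left(canon, min(mer, _rc(mer))) for mer in kmers}
-- ===== Notes on version B (the rewrite author's own statement) =====
-- stated objective: alternative
-- what changed: Replaces A's counter-and-membership id assignment (lookup of the reverse complement in the output dict, incrementing 'unique') by a two-stage scheme: filter the lex-sorted kmer list down to the canonical representatives (kmers not greater than their reverse complement), then every kmer's index is the rank of min(kmer, rc) in that sorted list found by binary search (bisect_left); protein mode is a dict comprehension over enumerate.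
import Mathlib
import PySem

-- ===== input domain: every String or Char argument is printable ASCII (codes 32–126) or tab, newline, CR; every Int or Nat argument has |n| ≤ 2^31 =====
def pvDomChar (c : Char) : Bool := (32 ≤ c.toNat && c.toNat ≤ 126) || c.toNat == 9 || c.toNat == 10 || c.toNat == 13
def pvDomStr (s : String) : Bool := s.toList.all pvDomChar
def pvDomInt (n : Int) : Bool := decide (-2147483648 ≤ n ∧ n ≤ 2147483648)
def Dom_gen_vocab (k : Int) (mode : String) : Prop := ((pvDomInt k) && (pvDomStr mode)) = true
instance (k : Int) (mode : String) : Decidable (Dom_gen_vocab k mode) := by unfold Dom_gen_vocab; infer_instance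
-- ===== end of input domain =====

-- B replaces A's counter-and-membership id assignment by two stages: filter the lex-sorted kmer
-- list down to canonical representatives, then index every kmer by binary search (bisect_left) of
-- min(kmer, revcomp) in that sorted list; protein mode is a comprehension over enumerate.

-- ===== PORT A =====

-- itertools.product(alphabet, repeat=n), leftmost position varying slowest (elements: chars as 1-char strings)
def pvProd (alpha : List String) : Nat → List (List String)
  | 0 => [[]]
  | n + 1 => alpha.flatMap (fun c => (pvProd alpha n).map (fun t => c :: t))

-- the chars of 'acgt', as 1-char strings
def pvAcgt : List String := ["a", "c", "g", "t"]

-- the chars of 'FSYCLIMVPTAHQNKDEWRG'.lower(), as 1-char strings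
def pvProt : List String :=
  ["f", "s", "y", "c", "l", "i", "m", "v", "p", "t", "a", "h", "q", "n", "k", "d", "e", "w", "r", "g"]

-- comp = {'a': 't', 'c': 'g', 't': 'a', 'g': 'c'}
def pvComp : PySem.Dict String String :=
  PySem.Dict.ofList [("a", "t"), ("c", "g"), ("t", "a"), ("g", "c")]

-- A's reverse_complement: comp[kmer[len-x-1]] always hits a key for 'acgt' kmers, so getD is exact there
def reverse_complement (kmer : List String) (comp : PySem.Dict String String) : List String :=
  (PySem.List.pyRange 0 (PySem.List.len kmer) 1).foldl
    (fun rc x => rc ++ [comp.getD (PySem.List.pyGetD kmer (PySem.List.len kmer - x - 1) "") ""]) []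

def gen_comp_dict (all_kmers : List (List String)) : PySem.Dict (List String) (List String) :=
  all_kmers.foldl (fun comps kmer => comps.insert kmer (reverse_complement kmer pvComp)) PySem.Dict.empty

def gen_vocab (k : Int) (mode : String) : List (List String × Int) :=
  -- k < 0 raises ValueError in itertools.product: excluded by Pre_ (k.toNat is unconstrained there)
  let all_kmers := if mode == "dna" then pvProd pvAcgt k.toNat else pvProd pvProt k.toNat
  -- comps is only defined (and only used) in dna mode; Dict.empty stands for Python's unbound name
  let comps := if mode == "dna" then gen_comp_dict all_kmers else PySem.Dict.empty
  (all_kmers.foldl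
    (fun (st : PySem.Dict (List String) Int × Int) mer =>
      if mode == "dna" then
        let rc := comps.getD mer []        -- comps[mer]: every mer of all_kmers is a key
        match st.1.get? rc with            -- 'if rc in vocab: … vocab[rc] …' as one lookup
        | some v => (st.1.insert mer v, st.2)
        | none => (st.1.insert mer st.2, st.2 + 1)
      else (st.1.insert mer st.2, st.2 + 1))
    (PySem.Dict.empty, (0 : Int))).1.items

-- ===== PORT B =====

-- rc = tuple(_COMP[b] for b in reversed(mer)); _COMP[b] always hits a key on 'acgt' kmers, getD exact there
def pvRC (mer : List String) : List String :=
  mer.reverse.map (fun b => pvComp.getD b "")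

-- Python '<' on tuples of strings (lexicographic; Python str '<' is Lean String '<')
def pvLtK : List String → List String → Bool
  | [], [] => false
  | [], _ :: _ => true
  | _ :: _, [] => false
  | a :: as, b :: bs => if a < b then true else if b < a then false else pvLtK as bs

-- builtin min(a, b): returns b iff b < a
def pvMin (a b : List String) : List String := if pvLtK b a then b else a

-- bisect.bisect_left(L, key), transliterated: lo/hi loop, mid = (lo+hi)//2
def pvBisect (L : List (List String)) (key : List String) (lo hi : Nat) : Nat :=
  if lo < hi then
    let mid := (lo + hi) / 2
    if pvLtK (L.getD mid []) key then pvBisect L key (mid + 1) hi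
    else pvBisect L key lo mid
  else lo
termination_by hi - lo
decreasing_by all_goals omega

def gen_vocab_alt (k : Int) (mode : String) : List (List String × Int) :=
  if mode == "dna" then
    let kmers := pvProd pvAcgt k.toNat
    let canon := kmers.filter (fun mer => !(pvLtK (pvRC mer) mer))
    (kmers.foldl
      (fun (d : PySem.Dict (List String) Int) mer =>
        d.insert mer ((pvBisect canon (pvMin mer (pvRC mer)) 0 canon.length : Nat) : Int))
      PySem.Dict.empty).items
  else
    (PySem.List.enumerate (pvProd pvProt k.toNat) 0).map (fun p => (p.2, p.1))

-- ===== PRECONDITION & SPEC =====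
-- Pre_ excludes k < 0, where itertools.product raises ValueError (in A and in B alike).
def Pre_gen_vocab (k : Int) (mode : String) : Prop := 0 ≤ k
instance (k : Int) (mode : String) : Decidable (Pre_gen_vocab k mode) := by unfold Pre_gen_vocab; infer_instance

def pvWitness_gen_vocab : Int × String := (2, "dna")

def Spec_gen_vocab (k : Int) (mode : String) (out : List (List String × Int)) : Prop := out = gen_vocab_alt k mode
instance (k : Int) (mode : String) (out : List (List String × Int)) : Decidable (Spec_gen_vocab k mode out) := by unfold Spec_gen_vocab; infer_instance

-- ===== CLAIM (what is proved, stated in full; the proofs are below) =====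
def Claim_equal_gen_vocab : Prop := ∀ (k : Int) (mode : String), Dom_gen_vocab k mode → Pre_gen_vocab k mode → Spec_gen_vocab k mode (gen_vocab k mode)

-- ===== LEMMAS AND PROOFS =====

-- --- the strict lexicographic order pvLtK ---
lemma pvLtK_irrefl (a : List String) : pvLtK a a = false := by
  induction a with
  | nil => rfl
  | cons x xs ih => simp [pvLtK, ih]

lemma pvLtK_asymm {a b : List String} (h : pvLtK a b = true) : pvLtK b a = false := by
  induction a generalizing b with
  | nil => cases b <;> simp [pvLtK]
  | cons x xs ih =>
    cases b with
    | nil => simp [pvLtK] at h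
    | cons y ys =>
      simp only [pvLtK] at h ⊢
      by_cases hxy : x < y
      · have : ¬ y < x := lt_asymm hxy
        simp [hxy, this]
      · by_cases hyx : y < x
        · simp [hxy, hyx] at h
        · simp only [hxy, hyx, if_false] at h ⊢
          simp [ih h]

lemma pvLtK_cons_same (c : String) (t1 t2 : List String) :
    pvLtK (c :: t1) (c :: t2) = pvLtK t1 t2 := by simp [pvLtK]

lemma mem_pvProd {alpha : List String} {n : Nat} {x : List String} :
    x ∈ pvProd alpha n ↔ x.length = n ∧ ∀ s ∈ x, s ∈ alpha := by
  induction n generalizing x with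
  | zero =>
    simp only [pvProd, List.mem_singleton]
    constructor
    · rintro rfl; simp
    · rintro ⟨hl, -⟩; exact List.length_eq_zero_iff.mp hl
  | succ n ih =>
    simp only [pvProd, List.mem_flatMap, List.mem_map]
    constructor
    · rintro ⟨c, hc, t, ht, rfl⟩
      obtain ⟨hl, ha⟩ := ih.mp ht
      refine ⟨by simp [hl], ?_⟩
      intro s hs
      rcases List.mem_cons.mp hs with rfl | hs
      · exact hc
      · exact ha s hs
    · rintro ⟨hl, ha⟩
      cases x with
      | nil => simp at hl
      | cons c t =>
        exact ⟨c, ha c (by simp), t,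
          ih.mpr ⟨by simpa using hl, fun s hs => ha s (by simp [hs])⟩, rfl⟩

lemma pairwise_pvProd {alpha : List String} (h : alpha.Pairwise (· < ·)) (n : Nat) :
    (pvProd alpha n).Pairwise (fun a b => pvLtK a b = true) := by
  induction n with
  | zero => simp [pvProd]
  | succ n ih =>
    rw [pvProd, List.pairwise_flatMap]
    constructor
    · intro c _
      rw [List.pairwise_map]
      exact ih.imp (fun {a b} hab => by rw [pvLtK_cons_same]; exact hab)
    · refine h.imp ?_
      intro c1 c2 h12 x hx y hy
      simp only [List.mem_map] at hx hy
      obtain ⟨t1, -, rfl⟩ := hx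
      obtain ⟨t2, -, rfl⟩ := hy
      simp [pvLtK, h12]

lemma nodup_pvProd {alpha : List String} (h : alpha.Nodup) (n : Nat) :
    (pvProd alpha n).Nodup := by
  induction n with
  | zero => simp [pvProd]
  | succ n ih =>
    rw [pvProd, List.Nodup, List.pairwise_flatMap]
    constructor
    · intro c _
      exact (ih.map (fun t1 t2 he => by injection he))
    · refine h.imp ?_
      intro c1 c2 h12 x hx y hy
      simp only [List.mem_map] at hx hy
      obtain ⟨t1, -, rfl⟩ := hx
      obtain ⟨t2, -, rfl⟩ := hy
      intro he
      injection he with he1 _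
      exact h12 he1

lemma pvComp_mem {s : String} (h : s ∈ pvAcgt) :
    pvComp.getD s "" ∈ pvAcgt ∧ pvComp.getD (pvComp.getD s "") "" = s := by
  fin_cases h <;> decide

lemma pvRC_mem {n : Nat} {x : List String} (hx : x ∈ pvProd pvAcgt n) :
    pvRC x ∈ pvProd pvAcgt n := by
  obtain ⟨hl, ha⟩ := mem_pvProd.mp hx
  refine mem_pvProd.mpr ⟨by simp [pvRC, hl], ?_⟩
  intro s hs
  simp only [pvRC, List.mem_map, List.mem_reverse] at hs
  obtain ⟨b, hb, rfl⟩ := hs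
  exact (pvComp_mem (ha b hb)).1

lemma pvRC_invol {n : Nat} {x : List String} (hx : x ∈ pvProd pvAcgt n) :
    pvRC (pvRC x) = x := by
  obtain ⟨-, ha⟩ := mem_pvProd.mp hx
  have h1 : pvRC (pvRC x) = x.map (fun s => pvComp.getD (pvComp.getD s "") "") := by
    simp [pvRC, List.map_reverse, List.map_map, Function.comp]
  rw [h1, List.map_congr_left (fun s hs => (pvComp_mem (ha s hs)).2)]
  simp

lemma reverse_complement_eq (kmer : List String) :
    reverse_complement kmer pvComp = pvRC kmer := by
  unfold reverse_complement pvRC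
  rw [PySem.List.len_eq, PySem.List.pyRange_zero_natCast,
    PySem.List.foldl_append_singleton_eq_map, List.nil_append, List.map_map]
  apply List.ext_getElem (by simp)
  intro i h1 h2
  simp only [List.getElem_map, List.getElem_range, Function.comp, List.getElem_reverse]
  have hi : i < kmer.length := by simpa using h1
  have harith : (kmer.length : Int) - (i : Int) - 1 = ((kmer.length - 1 - i : Nat) : Int) := by
    omega
  rw [harith, PySem.List.pyGetD_natCast]
  rw [List.getD_eq_getElem _ _ (by omega)]

lemma getD_fold_insert {β : Type} (f : List String → β) (dd : β) :
    ∀ (L : List (List String)) (d : PySem.Dict (List String) β) (m : List String),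
      (L.foldl (fun d x => d.insert x (f x)) d).getD m dd
        = if m ∈ L then f m else d.getD m dd := by
  intro L
  induction L with
  | nil => intro d m; simp
  | cons x xs ih =>
    intro d m
    rw [List.foldl_cons, ih]
    by_cases hm : m ∈ xs
    · simp [hm]
    · rw [PySem.Dict.getD_insert]
      by_cases hx : m = x
      · simp [hx]
      · simp [hx]

lemma getD_gen_comp_dict {L : List (List String)} {m : List String} (hm : m ∈ L) :
    (gen_comp_dict L).getD m [] = pvRC m := by
  unfold gen_comp_dict
  rw [getD_fold_insert (fun kmer => reverse_complement kmer pvComp) [] L PySem.Dict.empty m]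
  simp [hm, reverse_complement_eq]

-- inserting only fresh keys appends to items, so the corresponding dict comprehension is a map
lemma items_fold_insert (f : List String → Int) :
    ∀ (L : List (List String)) (d : PySem.Dict (List String) Int),
      (∀ x ∈ L, d.contains x = false) → L.Nodup →
      (L.foldl (fun d x => d.insert x (f x)) d).items
        = d.items ++ L.map (fun x => (x, f x)) := by
  intro L
  induction L with
  | nil => intro d _ _; simp
  | cons m rest ih =>
    intro d hfresh hnd
    rw [List.foldl_cons, ih (d.insert m (f m))
        (by
          intro x hx
          rw [PySem.Dict.contains_insert]
          have hxm : (x == m) = false := by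
            simp only [beq_eq_false_iff_ne, ne_eq]
            intro h; subst h
            exact (List.nodup_cons.mp hnd).1 hx
          rw [hxm, hfresh x (by simp [hx])]
          rfl)
        (List.nodup_cons.mp hnd).2,
      PySem.Dict.items_insert_of_not_contains _ (f m) (hfresh m (by simp))]
    simp

lemma protFold :
    ∀ (L : List (List String)) (d : PySem.Dict (List String) Int) (u : Int),
      (∀ x ∈ L, d.contains x = false) → L.Nodup →
      ((L.foldl (fun (st : PySem.Dict (List String) Int × Int) mer =>
          (st.1.insert mer st.2, st.2 + 1)) (d, u)).1).items
        = d.items ++ (PySem.List.enumerate L u).map (fun p => (p.2, p.1)) := by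
  intro L
  induction L with
  | nil => intro d u _ _; simp [PySem.List.enumerate]
  | cons m rest ih =>
    intro d u hfresh hnd
    rw [List.foldl_cons, ih (d.insert m u) (u + 1)
        (by
          intro x hx
          rw [PySem.Dict.contains_insert]
          have hxm : (x == m) = false := by
            simp only [beq_eq_false_iff_ne, ne_eq]
            intro h; subst h
            exact (List.nodup_cons.mp hnd).1 hx
          rw [hxm, hfresh x (by simp [hx])]
          rfl)
        (List.nodup_cons.mp hnd).2,
      PySem.Dict.items_insert_of_not_contains _ u (hfresh m (by simp)),
      PySem.List.enumerate_cons]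
    simp

-- binary-search invariant: if all entries before j are < key and none from j on is,
-- and lo ≤ j ≤ hi ≤ |L|, then bisect_left lands exactly on j
lemma pvBisect_inv (L : List (List String)) (key : List String) (j : Nat)
    (H1 : ∀ i, i < j → pvLtK (L.getD i []) key = true)
    (H2 : ∀ i, j ≤ i → i < L.length → pvLtK (L.getD i []) key = false) :
    ∀ n lo hi, hi - lo ≤ n → lo ≤ j → j ≤ hi → hi ≤ L.length → pvBisect L key lo hi = j := by
  intro n
  induction n with
  | zero =>
    intro lo hi hn h1 h2 h3
    rw [pvBisect]
    have : ¬ lo < hi := by omega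
    simp only [this, if_false]
    omega
  | succ n ih =>
    intro lo hi hn h1 h2 h3
    rw [pvBisect]
    by_cases hlt : lo < hi
    · simp only [hlt, if_true]
      have hmid1 : lo ≤ (lo + hi) / 2 := by omega
      have hmid2 : (lo + hi) / 2 < hi := by omega
      by_cases hc : pvLtK (L.getD ((lo + hi) / 2) []) key = true
      · simp only [hc, if_true]
        have hj : (lo + hi) / 2 < j := by
          by_contra hge
          rw [H2 _ (by omega) (by omega)] at hc
          exact Bool.false_ne_true hc
        exact ih ((lo + hi) / 2 + 1) hi (by omega) (by omega) h2 h3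
      · simp only [hc, if_false]
        have hj : j ≤ (lo + hi) / 2 := by
          by_contra hgt
          exact hc (H1 _ (by omega))
        exact ih lo ((lo + hi) / 2) (by omega) h1 hj (by omega)
    · simp only [hlt, if_false]
      omega

-- A's loop, related directly to B's per-kmer value
lemma dnaLoop (L : List (List String)) (comps : PySem.Dict (List String) (List String))
    (canon : List (List String))
    (hcanon : canon = L.filter (fun m => !(pvLtK (pvRC m) m)))
    (hcomps : ∀ m ∈ L, comps.getD m [] = pvRC m)
    (hsort : L.Pairwise (fun a b => pvLtK a b = true))
    (hcl : ∀ x ∈ L, pvRC x ∈ L)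
    (hinv : ∀ x ∈ L, pvRC (pvRC x) = x) :
    ∀ (rest P : List (List String)) (vocab : PySem.Dict (List String) Int) (u : Int),
      L = P ++ rest →
      (∀ x, vocab.get? x
        = if x ∈ P then some ((pvBisect canon (pvMin x (pvRC x)) 0 canon.length : Nat) : Int) else none) →
      vocab.items = P.map (fun x => (x, ((pvBisect canon (pvMin x (pvRC x)) 0 canon.length : Nat) : Int))) →
      u = ((P.filter (fun m => !(pvLtK (pvRC m) m))).length : Int) →
      ((rest.foldl (fun (st : PySem.Dict (List String) Int × Int) mer =>
          match st.1.get? (comps.getD mer []) with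
          | some v => (st.1.insert mer v, st.2)
          | none => (st.1.insert mer st.2, st.2 + 1)) (vocab, u)).1).items
        = L.map (fun x => (x, ((pvBisect canon (pvMin x (pvRC x)) 0 canon.length : Nat) : Int))) := by
  intro rest
  induction rest with
  | nil =>
    intro P vocab u hL _ hitems _
    rw [List.foldl_nil, hitems, hL]
    simp
  | cons m rest ih =>
    intro P vocab u hL hget hitems hu
    have hmL : m ∈ L := by rw [hL]; simp
    have hsort' := hL ▸ hsort
    obtain ⟨-, hmr, hcross⟩ := List.pairwise_append.mp hsort'
    have hPm : ∀ p ∈ P, pvLtK p m = true := fun p hp => hcross p hp m (by simp)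
    have hmrest : ∀ b ∈ rest, pvLtK m b = true := (List.pairwise_cons.mp hmr).1
    have hmP : m ∉ P := by
      intro h
      have := hPm m h
      rw [pvLtK_irrefl] at this
      exact Bool.false_ne_true this
    have hrcL : pvRC m ∈ L := hcl m hmL
    have hfresh : vocab.get? m = none := by rw [hget]; simp [hmP]
    have hnotc : vocab.contains m = false := by
      rw [PySem.Dict.contains_eq_isSome_get?, hfresh]; rfl
    rw [List.foldl_cons]
    by_cases hrc : pvLtK (pvRC m) m = true
    · -- rc < m: the complement was seen earlier; A copies, and B computed the same rank for both
      have hrcP : pvRC m ∈ P := by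
        rw [hL] at hrcL
        rcases List.mem_append.mp hrcL with h | h
        · exact h
        · rcases List.mem_cons.mp h with h | h
          · rw [h] at hrc; rw [pvLtK_irrefl] at hrc; exact absurd hrc Bool.false_ne_true
          · have := hmrest _ h
            rw [pvLtK_asymm this] at hrc
            exact absurd hrc Bool.false_ne_true
      have hmin1 : pvMin m (pvRC m) = pvRC m := by simp [pvMin, hrc]
      have hmin2 : pvMin (pvRC m) (pvRC (pvRC m)) = pvRC m := by
        rw [hinv m hmL]
        simp [pvMin, pvLtK_asymm hrc]
      have hv : vocab.get? (comps.getD m [])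
          = some ((pvBisect canon (pvRC m) 0 canon.length : Nat) : Int) := by
        rw [hcomps m hmL, hget]
        simp [hrcP, hmin2]
      rw [hv]
      apply ih (P ++ [m]) _ u
      · rw [hL]; simp
      · intro x
        rw [PySem.Dict.get?_insert]
        by_cases hx : x = m
        · simp [hx, hmin1]
        · simp only [hx, if_false]
          rw [hget]
          simp [hx]
      · rw [PySem.Dict.items_insert_of_not_contains _ _ hnotc, hitems]
        simp [hmin1]
      · rw [hu, List.filter_append]
        simp [hrc]
    · -- m is canonical: A opens a new bin at index u; u is m's rank in canon
      have hrc' : pvLtK (pvRC m) m = false := by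
        cases h : pvLtK (pvRC m) m
        · rfl
        · exact absurd h hrc
      have hmin1 : pvMin m (pvRC m) = m := by simp [pvMin, hrc']
      have hrcnP : vocab.get? (comps.getD m []) = none := by
        rw [hcomps m hmL, hget]
        have hnp : pvRC m ∉ P := by
          intro h
          have := hPm _ h
          rw [hrc'] at this
          exact Bool.false_ne_true this
        simp [hnp]
      -- canon splits around m, giving the rank j = |canonicals in P|
      have hLsplit : canon = (P.filter (fun x => !(pvLtK (pvRC x) x)))
          ++ m :: (rest.filter (fun x => !(pvLtK (pvRC x) x))) := by
        rw [hcanon, hL, List.filter_append, List.filter_cons]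
        simp [hrc']
      have hrank : pvBisect canon m 0 canon.length
          = (P.filter (fun x => !(pvLtK (pvRC x) x))).length := by
        rw [hLsplit]
        set A' := P.filter (fun x => !(pvLtK (pvRC x) x)) with hA
        set B' := rest.filter (fun x => !(pvLtK (pvRC x) x)) with hB
        have hlen : (A' ++ m :: B').length = A'.length + 1 + B'.length := by simp; omega
        apply pvBisect_inv (A' ++ m :: B') m A'.length _ _ (A' ++ m :: B').length 0 _
          (by omega) (by omega) (by rw [hlen]; omega) (le_refl _)
        · intro i hij
          have hilen : i < (A' ++ m :: B').length := by rw [hlen]; omega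
          rw [List.getD_eq_getElem _ _ hilen, List.getElem_append_left hij]
          exact hPm _ (List.mem_of_mem_filter (List.getElem_mem _))
        · intro i hji hilen
          rw [List.getD_eq_getElem _ _ hilen, List.getElem_append_right hji]
          rcases Nat.eq_or_lt_of_le hji with he | hlt
          · have h0 : i - A'.length = 0 := by omega
            simp only [h0, List.getElem_cons_zero]
            exact pvLtK_irrefl m
          · have hne : i - A'.length ≠ 0 := by omega
            rw [List.getElem_cons]
            simp only [hne, dif_neg, not_false_eq_true]
            exact pvLtK_asymm (hmrest _ (List.mem_of_mem_filter (List.getElem_mem _)))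
      rw [hrcnP]
      apply ih (P ++ [m]) _ (u + 1)
      · rw [hL]; simp
      · intro x
        rw [PySem.Dict.get?_insert]
        by_cases hx : x = m
        · simp only [hx, if_true, List.mem_append, List.mem_singleton, or_true, if_true]
          rw [hmin1, hrank, hu]
        · simp only [hx, if_false]
          rw [hget]
          simp [hx]
      · rw [PySem.Dict.items_insert_of_not_contains _ _ hnotc, hitems]
        simp only [List.map_append, List.map_cons, List.map_nil]
        rw [hmin1, hrank, hu]
      · rw [hu, List.filter_append, List.filter_cons]
        simp only [hrc', Bool.not_false, if_true]
        simp [add_comm]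

lemma pvAcgt_sorted : pvAcgt.Pairwise (· < ·) := by
  have h : ∀ (a b : String), a.toList < b.toList → a < b :=
    fun a b => String.lt_iff_toList_lt.mpr
  unfold pvAcgt
  refine List.Pairwise.cons ?_ (List.Pairwise.cons ?_ (List.Pairwise.cons ?_
    (List.Pairwise.cons ?_ List.Pairwise.nil)))
  all_goals (intro b hb; fin_cases hb <;> exact h _ _ (by decide))

lemma pvAcgt_nodup : pvAcgt.Nodup := by decide

lemma pvProt_nodup : pvProt.Nodup := by decide

-- ===== VERDICT (by name: the statement is the Claim_ definition above) =====
theorem gen_vocab_spec : Claim_equal_gen_vocab := by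
  intro k mode _ _
  unfold Spec_gen_vocab
  by_cases hm : (mode == "dna") = true
  · simp only [gen_vocab, gen_vocab_alt, hm, if_true]
    rw [dnaLoop (pvProd pvAcgt k.toNat) (gen_comp_dict (pvProd pvAcgt k.toNat))
      ((pvProd pvAcgt k.toNat).filter (fun m => !(pvLtK (pvRC m) m))) rfl
      (fun m hmm => getD_gen_comp_dict hmm)
      (pairwise_pvProd pvAcgt_sorted k.toNat)
      (fun x hx => pvRC_mem hx)
      (fun x hx => pvRC_invol hx)
      (pvProd pvAcgt k.toNat) [] PySem.Dict.empty 0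
      rfl
      (by intro x; simp [PySem.Dict.get?_empty])
      (by simp [PySem.Dict.empty])
      (by simp),
      items_fold_insert _ (pvProd pvAcgt k.toNat) PySem.Dict.empty
      (by intro x _; rw [PySem.Dict.contains_eq_isSome_get?, PySem.Dict.get?_empty]; rfl)
      (nodup_pvProd pvAcgt_nodup k.toNat)]
    simp [PySem.Dict.empty]
  · simp only [gen_vocab, gen_vocab_alt, hm, if_false, Bool.false_eq_true]
    rw [protFold (pvProd pvProt k.toNat) PySem.Dict.empty 0
      (by intro x _; rw [PySem.Dict.contains_eq_isSome_get?, PySem.Dict.get?_empty]; rfl)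
      (nodup_pvProd pvProt_nodup k.toNat)]
    simp [PySem.Dict.empty]
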